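-- pv_equiv track=rewrite | github.com/kierancyh/Variant-ASIC-Explorer | tools/scripts/compare_runs.py | raw_metric_sort_priority
-- ===== SOURCE A (Python) =====
-- from typing import Any, Dict, Iterable, List, Optional, Sequence, Set, Tuple
--
-- def raw_metric_sort_priority(raw_key: str) -> Tuple[int, str]:
--     priorities = [
--         ("clock__", 0),
--         ("timing__", 0),
--         ("power__", 1),
--         ("design__", 2),
--         ("floorplan__", 2),
--         ("place__", 3),
--         ("route__", 4),
--         ("cts__", 5),
--         ("drc__", 6),
--         ("klayout__", 6),
--         ("magic__", 6),
--         ("lvs__", 6),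
--         ("antenna__", 6),
--         ("ir__", 6),
--     ]
--     for prefix, rank in priorities:
--         if raw_key.startswith(prefix):
--             return (rank, raw_key)
--     return (99, raw_key)
-- ===== SOURCE B (Python) =====
-- _RANK = {name: rank
--          for rank, names in enumerate(
--              ["clock timing", "power", "design floorplan", "place",
--               "route", "cts", "drc klayout magic lvs antenna ir"])
--          for name in names.split()}
--
-- def raw_metric_sort_priority(raw_key):
--     cut = raw_key.find("__")
--     if cut < 0:
--         return (99, raw_key)
--     return (_RANK.get(raw_key[:cut], 99), raw_key)
-- ===== Notes on version B (the rewrite author's own statement) =====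
-- stated objective: simpler
-- what changed: Replaces A's linear startswith scan over a 14-entry prefix list by a stage-name dict built once from rank groups; the lookup key is the text before the first double-underscore delimiter, found in a single pass, so no table prefix is ever compared against raw_key.
import Mathlib
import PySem

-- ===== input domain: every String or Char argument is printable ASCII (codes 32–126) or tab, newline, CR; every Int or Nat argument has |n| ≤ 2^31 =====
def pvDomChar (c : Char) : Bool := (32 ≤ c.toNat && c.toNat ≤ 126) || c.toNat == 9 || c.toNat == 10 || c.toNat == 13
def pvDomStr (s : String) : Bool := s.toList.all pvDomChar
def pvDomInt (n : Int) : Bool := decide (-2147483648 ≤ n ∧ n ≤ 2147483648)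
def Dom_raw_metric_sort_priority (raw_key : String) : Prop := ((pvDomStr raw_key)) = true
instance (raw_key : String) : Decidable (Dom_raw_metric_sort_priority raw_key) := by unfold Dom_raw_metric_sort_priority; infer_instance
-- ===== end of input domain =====

-- B replaces A's linear startswith scan over a 14-entry prefix list by a stage-name dict
-- built once from rank groups and a single lookup keyed by the text before the first "__"
-- (objective: simpler/idiomatic); same return value everywhere.

-- ===== PORT A =====
def pvPriorities : List (String × Int) :=
  [("clock__", 0), ("timing__", 0), ("power__", 1), ("design__", 2), ("floorplan__", 2),
   ("place__", 3), ("route__", 4), ("cts__", 5), ("drc__", 6), ("klayout__", 6),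
   ("magic__", 6), ("lvs__", 6), ("antenna__", 6), ("ir__", 6)]

def pvLoopA (raw_key : String) : List (String × Int) → Int × String
  | [] => (99, raw_key)
  | (pfx, rank) :: rest =>
    if PySem.Str.startswith raw_key pfx then (rank, raw_key) else pvLoopA raw_key rest

def raw_metric_sort_priority (raw_key : String) : Int × String :=
  pvLoopA raw_key pvPriorities

-- ===== PORT B =====
-- _RANK = {name: rank for rank, names in enumerate(groups) for name in names.split()}
def pvRank : PySem.Dict String Int :=
  (PySem.List.enumerate
      ["clock timing", "power", "design floorplan", "place",
       "route", "cts", "drc klayout magic lvs antenna ir"]).foldl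
    (fun d p => (PySem.Str.split₀ p.2).foldl (fun d name => d.insert name p.1) d)
    (PySem.Dict.ofList [])

def raw_metric_sort_priority_alt (raw_key : String) : Int × String :=
  let cut := PySem.Str.find raw_key "__"
  if cut < 0 then (99, raw_key)
  else (pvRank.getD (PySem.Str.slice raw_key none (some cut)) 99, raw_key)

-- ===== PRECONDITION & SPEC =====
def Spec_raw_metric_sort_priority (raw_key : String) (out : Int × String) : Prop := out = raw_metric_sort_priority_alt raw_key
instance (raw_key : String) (out : Int × String) : Decidable (Spec_raw_metric_sort_priority raw_key out) := by unfold Spec_raw_metric_sort_priority; infer_instance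

-- ===== CLAIM (what is proved, stated in full; the proofs are below) =====
def Claim_equal_raw_metric_sort_priority : Prop := ∀ (raw_key : String), Dom_raw_metric_sort_priority raw_key → Spec_raw_metric_sort_priority raw_key (raw_metric_sort_priority raw_key)

-- ===== LEMMAS AND PROOFS =====

-- the first occurrence of "__" in l is exactly at w.length when w++"__" is a prefix of l
-- and w itself contains no '_'
lemma pv_find_at (l w : List Char) (hw : ∀ c ∈ w, c ≠ '_')
    (h : (w ++ ['_', '_']) <+: l) :
    PySem.Chars.find l ['_', '_'] = (w.length : Int) := by
  obtain ⟨t, ht⟩ := h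
  have hinf : ['_', '_'] <:+: l := by
    refine ⟨w, t, by simpa using ht⟩
  have h0 : 0 ≤ PySem.Chars.find l ['_', '_'] := (PySem.Chars.find_nonneg_iff l ['_', '_']).mpr hinf
  obtain ⟨hpre, hmin⟩ := PySem.Chars.find_spec (s := l) (sub := ['_', '_']) h0
  have hdrop : l.drop w.length = '_' :: '_' :: t := by
    subst ht
    simp
  have hle : (PySem.Chars.find l ['_', '_']).toNat ≤ w.length := by
    by_contra hlt
    rw [not_le] at hlt
    exact hmin w.length hlt (by rw [hdrop]; exact ⟨t, rfl⟩)
  have hge : ¬ (PySem.Chars.find l ['_', '_']).toNat < w.length := by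
    intro hlt
    obtain ⟨u, hu⟩ := hpre
    set n := (PySem.Chars.find l ['_', '_']).toNat with hn
    have hnth : l[n]? = some '_' := by
      have : (l.drop n)[0]? = some '_' := by rw [← hu]; rfl
      simpa [List.getElem?_drop] using this
    have hnth' : l[n]? = some w[n] := by
      subst ht
      rw [List.append_assoc, List.getElem?_append_left (by simpa using hlt)]
      simp [hlt]
    have : w[n] = '_' := by
      rw [hnth'] at hnth; exact (Option.some.injEq _ _).mp hnth
    exact hw _ (List.getElem_mem _) this
  omega

-- a matching table prefix p = stage ++ "__" (stage without '_') pins down B's lookup key to stage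
lemma pv_alt_hit (s p stage : String) (w : List Char)
    (hp : p.toList = w ++ ['_', '_']) (hst : stage.toList = w)
    (hw : ∀ c ∈ w, c ≠ '_')
    (h : PySem.Str.startswith s p = true) :
    raw_metric_sort_priority_alt s = (pvRank.getD stage 99, s) := by
  have hpre : (w ++ ['_', '_']) <+: s.toList := by
    have := (PySem.Chars.startswith_iff s.toList p.toList).mp (by simpa using h)
    rwa [hp] at this
  have hfind : PySem.Chars.find s.toList ['_', '_'] = (w.length : Int) :=
    pv_find_at s.toList w hw hpre
  have hfind' : PySem.Str.find s "__" = (w.length : Int) := by simpa using hfind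
  have hslice : PySem.Str.slice s none (some ((w.length : Int))) = stage := by
    apply String.toList_inj.mp
    obtain ⟨t, ht⟩ := hpre
    rw [PySem.Str.toList_slice, PySem.Chars.slice_eq_listSlice,
        PySem.List.slice_to _ (by omega), hst]
    have h2 : ((w.length : Int)).toNat = w.length := by omega
    rw [h2, ← ht, List.append_assoc, List.take_left' rfl]
  simp only [raw_metric_sort_priority_alt]
  rw [hfind', if_neg (by omega), hslice]

-- a key outside the dict's key list misses the dict
set_option maxRecDepth 4096 in
lemma pv_table_miss (c : String)
    (h : c ∉ (["clock", "timing", "power", "design", "floorplan", "place", "route", "cts", "drc", "klayout", "magic", "lvs", "antenna", "ir"] : List String)) :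
    pvRank.getD c 99 = 99 := by
  apply PySem.Dict.getD_of_not_contains
  by_contra hcon
  have hmem := (PySem.Dict.contains_iff_mem_keys pvRank c).mp (Bool.of_not_eq_false hcon)
  have hkeys : pvRank.keys = ["clock", "timing", "power", "design", "floorplan", "place", "route", "cts", "drc", "klayout", "magic", "lvs", "antenna", "ir"] := by decide
  rw [hkeys] at hmem
  exact h hmem

-- no table prefix matching means no table key is a prefix of s
lemma pv_hswf (s : String)
    (hall : ∀ p r, (p, r) ∈ pvPriorities → PySem.Str.startswith s p = false)
    (p : String) (r : Int) (hm : (p, r) ∈ pvPriorities) :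
    ¬ (p.toList <+: s.toList) := by
  intro hpf
  have ht : PySem.Str.startswith s p = true := by
    simpa using (PySem.Chars.startswith_iff s.toList p.toList).mpr hpf
  rw [hall p r hm] at ht
  exact Bool.false_ne_true ht

-- when "__" occurs in s, the lookup key followed by "__" is a prefix of s
lemma pv_cand_ext (s : String) (hi : ¬ PySem.Str.find s "__" < 0) :
    (PySem.Str.slice s none (some (PySem.Str.find s "__"))).toList ++ ['_', '_'] <+: s.toList := by
  have h0 : 0 ≤ PySem.Chars.find s.toList ['_', '_'] := by simpa using not_lt.mp hi
  obtain ⟨hpre, -⟩ := PySem.Chars.find_spec (s := s.toList) (sub := ['_', '_']) h0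
  obtain ⟨u, hu⟩ := hpre
  have hsl : (PySem.Str.slice s none (some (PySem.Str.find s "__"))).toList
      = s.toList.take (PySem.Chars.find s.toList ['_', '_']).toNat := by
    rw [PySem.Str.toList_slice, PySem.Chars.slice_eq_listSlice]
    simp only [PySem.Str.find_eq]
    have h__ : ("__".toList : List Char) = ['_', '_'] := rfl
    rw [h__, PySem.List.slice_to _ h0]
  refine ⟨u, ?_⟩
  rw [hsl, List.append_assoc, hu, List.take_append_drop]

-- if no slot of A's table matches, B's lookup key misses the dict and B returns 99
lemma pv_alt_miss (s : String)
    (hall : ∀ p r, (p, r) ∈ pvPriorities → PySem.Str.startswith s p = false) :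
    raw_metric_sort_priority_alt s = (99, s) := by
  simp only [raw_metric_sort_priority_alt]
  by_cases hi : PySem.Str.find s "__" < 0
  · rw [if_pos hi]
  · rw [if_neg hi]
    have hcp := pv_cand_ext s hi
    simp only [Prod.mk.injEq]
    refine ⟨pv_table_miss _ ?_, trivial⟩
    intro hmem
    simp only [List.mem_cons, List.not_mem_nil, or_false] at hmem
    rcases hmem with h | h | h | h | h | h | h | h | h | h | h | h | h | h <;>
      rw [h] at hcp <;>
      first
        | exact pv_hswf s hall "clock__" 0 (by decide) (by simpa using hcp)
        | exact pv_hswf s hall "timing__" 0 (by decide) (by simpa using hcp)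
        | exact pv_hswf s hall "power__" 1 (by decide) (by simpa using hcp)
        | exact pv_hswf s hall "design__" 2 (by decide) (by simpa using hcp)
        | exact pv_hswf s hall "floorplan__" 2 (by decide) (by simpa using hcp)
        | exact pv_hswf s hall "place__" 3 (by decide) (by simpa using hcp)
        | exact pv_hswf s hall "route__" 4 (by decide) (by simpa using hcp)
        | exact pv_hswf s hall "cts__" 5 (by decide) (by simpa using hcp)
        | exact pv_hswf s hall "drc__" 6 (by decide) (by simpa using hcp)
        | exact pv_hswf s hall "klayout__" 6 (by decide) (by simpa using hcp)
        | exact pv_hswf s hall "magic__" 6 (by decide) (by simpa using hcp)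
        | exact pv_hswf s hall "lvs__" 6 (by decide) (by simpa using hcp)
        | exact pv_hswf s hall "antenna__" 6 (by decide) (by simpa using hcp)
        | exact pv_hswf s hall "ir__" 6 (by decide) (by simpa using hcp)

-- ===== VERDICT (by name: the statement is the Claim_ definition above) =====
set_option maxRecDepth 8192 in
theorem raw_metric_sort_priority_spec : Claim_equal_raw_metric_sort_priority := by
  intro raw_key _
  unfold Spec_raw_metric_sort_priority raw_metric_sort_priority pvPriorities
  simp only [pvLoopA]
  by_cases h1 : PySem.Str.startswith raw_key "clock__" = true
  · rw [if_pos h1, pv_alt_hit raw_key "clock__" "clock" ['c','l','o','c','k'] (by simp) (by simp) (by simp) h1]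
    simp only [Prod.mk.injEq]; exact ⟨by decide, trivial⟩
  · rw [if_neg h1]
    by_cases h2 : PySem.Str.startswith raw_key "timing__" = true
    · rw [if_pos h2, pv_alt_hit raw_key "timing__" "timing" ['t','i','m','i','n','g'] (by simp) (by simp) (by simp) h2]
      simp only [Prod.mk.injEq]; exact ⟨by decide, trivial⟩
    · rw [if_neg h2]
      by_cases h3 : PySem.Str.startswith raw_key "power__" = true
      · rw [if_pos h3, pv_alt_hit raw_key "power__" "power" ['p','o','w','e','r'] (by simp) (by simp) (by simp) h3]
        simp only [Prod.mk.injEq]; exact ⟨by decide, trivial⟩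
      · rw [if_neg h3]
        by_cases h4 : PySem.Str.startswith raw_key "design__" = true
        · rw [if_pos h4, pv_alt_hit raw_key "design__" "design" ['d','e','s','i','g','n'] (by simp) (by simp) (by simp) h4]
          simp only [Prod.mk.injEq]; exact ⟨by decide, trivial⟩
        · rw [if_neg h4]
          by_cases h5 : PySem.Str.startswith raw_key "floorplan__" = true
          · rw [if_pos h5, pv_alt_hit raw_key "floorplan__" "floorplan" ['f','l','o','o','r','p','l','a','n'] (by simp) (by simp) (by simp) h5]
            simp only [Prod.mk.injEq]; exact ⟨by decide, trivial⟩
          · rw [if_neg h5]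
            by_cases h6 : PySem.Str.startswith raw_key "place__" = true
            · rw [if_pos h6, pv_alt_hit raw_key "place__" "place" ['p','l','a','c','e'] (by simp) (by simp) (by simp) h6]
              simp only [Prod.mk.injEq]; exact ⟨by decide, trivial⟩
            · rw [if_neg h6]
              by_cases h7 : PySem.Str.startswith raw_key "route__" = true
              · rw [if_pos h7, pv_alt_hit raw_key "route__" "route" ['r','o','u','t','e'] (by simp) (by simp) (by simp) h7]
                simp only [Prod.mk.injEq]; exact ⟨by decide, trivial⟩
              · rw [if_neg h7]
                by_cases h8 : PySem.Str.startswith raw_key "cts__" = true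
                · rw [if_pos h8, pv_alt_hit raw_key "cts__" "cts" ['c','t','s'] (by simp) (by simp) (by simp) h8]
                  simp only [Prod.mk.injEq]; exact ⟨by decide, trivial⟩
                · rw [if_neg h8]
                  by_cases h9 : PySem.Str.startswith raw_key "drc__" = true
                  · rw [if_pos h9, pv_alt_hit raw_key "drc__" "drc" ['d','r','c'] (by simp) (by simp) (by simp) h9]
                    simp only [Prod.mk.injEq]; exact ⟨by decide, trivial⟩
                  · rw [if_neg h9]
                    by_cases h10 : PySem.Str.startswith raw_key "klayout__" = true
                    · rw [if_pos h10, pv_alt_hit raw_key "klayout__" "klayout" ['k','l','a','y','o','u','t'] (by simp) (by simp) (by simp) h10]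
                      simp only [Prod.mk.injEq]; exact ⟨by decide, trivial⟩
                    · rw [if_neg h10]
                      by_cases h11 : PySem.Str.startswith raw_key "magic__" = true
                      · rw [if_pos h11, pv_alt_hit raw_key "magic__" "magic" ['m','a','g','i','c'] (by simp) (by simp) (by simp) h11]
                        simp only [Prod.mk.injEq]; exact ⟨by decide, trivial⟩
                      · rw [if_neg h11]
                        by_cases h12 : PySem.Str.startswith raw_key "lvs__" = true
                        · rw [if_pos h12, pv_alt_hit raw_key "lvs__" "lvs" ['l','v','s'] (by simp) (by simp) (by simp) h12]
                          simp only [Prod.mk.injEq]; exact ⟨by decide, trivial⟩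
                        · rw [if_neg h12]
                          by_cases h13 : PySem.Str.startswith raw_key "antenna__" = true
                          · rw [if_pos h13, pv_alt_hit raw_key "antenna__" "antenna" ['a','n','t','e','n','n','a'] (by simp) (by simp) (by simp) h13]
                            simp only [Prod.mk.injEq]; exact ⟨by decide, trivial⟩
                          · rw [if_neg h13]
                            by_cases h14 : PySem.Str.startswith raw_key "ir__" = true
                            · rw [if_pos h14, pv_alt_hit raw_key "ir__" "ir" ['i','r'] (by simp) (by simp) (by simp) h14]
                              simp only [Prod.mk.injEq]; exact ⟨by decide, trivial⟩
                            · rw [if_neg h14]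
                              refine (pv_alt_miss raw_key ?_).symm
                              intro p r hm
                              simp only [pvPriorities, List.mem_cons, List.not_mem_nil, or_false] at hm
                              rcases hm with h | h | h | h | h | h | h | h | h | h | h | h | h | h
                              · rw [Prod.mk.injEq] at h; obtain ⟨rfl, -⟩ := h; exact (Bool.not_eq_true _).mp h1
                              · rw [Prod.mk.injEq] at h; obtain ⟨rfl, -⟩ := h; exact (Bool.not_eq_true _).mp h2
                              · rw [Prod.mk.injEq] at h; obtain ⟨rfl, -⟩ := h; exact (Bool.not_eq_true _).mp h3
                              · rw [Prod.mk.injEq] at h; obtain ⟨rfl, -⟩ := h; exact (Bool.not_eq_true _).mp h4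
                              · rw [Prod.mk.injEq] at h; obtain ⟨rfl, -⟩ := h; exact (Bool.not_eq_true _).mp h5
                              · rw [Prod.mk.injEq] at h; obtain ⟨rfl, -⟩ := h; exact (Bool.not_eq_true _).mp h6
                              · rw [Prod.mk.injEq] at h; obtain ⟨rfl, -⟩ := h; exact (Bool.not_eq_true _).mp h7
                              · rw [Prod.mk.injEq] at h; obtain ⟨rfl, -⟩ := h; exact (Bool.not_eq_true _).mp h8
                              · rw [Prod.mk.injEq] at h; obtain ⟨rfl, -⟩ := h; exact (Bool.not_eq_true _).mp h9
                              · rw [Prod.mk.injEq] at h; obtain ⟨rfl, -⟩ := h; exact (Bool.not_eq_true _).mp h10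
                              · rw [Prod.mk.injEq] at h; obtain ⟨rfl, -⟩ := h; exact (Bool.not_eq_true _).mp h11
                              · rw [Prod.mk.injEq] at h; obtain ⟨rfl, -⟩ := h; exact (Bool.not_eq_true _).mp h12
                              · rw [Prod.mk.injEq] at h; obtain ⟨rfl, -⟩ := h; exact (Bool.not_eq_true _).mp h13
                              · rw [Prod.mk.injEq] at h; obtain ⟨rfl, -⟩ := h; exact (Bool.not_eq_true _).mp h14
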